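-- pv_equiv track=rewrite | github.com/MrBrantCode/unitest_baseline | mut_generate/mist_train_cf/cf_70654/solution.py | antichain_sum
-- ===== SOURCE A (Python) =====
-- def antichain_sum(n):
--     is_prime = [1]*(n+1)
--     prime_factors = [0]*(n+1)
--
--     for i in range(2, n+1):
--         if is_prime[i] == 1:
--             for j in range(i, n+1, i):
--                 is_prime[j] = 0
--                 prime_factors[j] += 1
--
--     return sum(prime_factors)
-- ===== SOURCE B (Python) =====
-- def is_prime_td(p):
--     if p % 2 == 0:
--         return p == 2
--     d = 3
--     while d * d <= p:
--         if p % d == 0: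
--             return False
--         d += 2
--     return True
--
-- def antichain_sum(n):
--     # the total of the distinct-prime-factor counts over the range equals
--     # the sum of n // p over primes p up to n (each prime p contributes one
--     # unit for each of its n // p multiples in the range).
--     total = 0
--     for p in range(2, n + 1):
--         if is_prime_td(p):
--             total += n // p
--     return total
-- ===== Notes on version B (the rewrite author's own statement) =====
-- stated objective: alternative
-- what changed: Replaces A's sieve (two O(n) counter arrays, per-number distinct-prime-factor counts summed at the end) by the closed-form identity that the total of the distinct-prime-factor counts equals the sum of n//p over primes p up to n, computed with no arrays at all: one loop over p adding n//p whenever an odd-step trial-division primality test (divisors up to sqrt(p)) says p is prime.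
import Mathlib
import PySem

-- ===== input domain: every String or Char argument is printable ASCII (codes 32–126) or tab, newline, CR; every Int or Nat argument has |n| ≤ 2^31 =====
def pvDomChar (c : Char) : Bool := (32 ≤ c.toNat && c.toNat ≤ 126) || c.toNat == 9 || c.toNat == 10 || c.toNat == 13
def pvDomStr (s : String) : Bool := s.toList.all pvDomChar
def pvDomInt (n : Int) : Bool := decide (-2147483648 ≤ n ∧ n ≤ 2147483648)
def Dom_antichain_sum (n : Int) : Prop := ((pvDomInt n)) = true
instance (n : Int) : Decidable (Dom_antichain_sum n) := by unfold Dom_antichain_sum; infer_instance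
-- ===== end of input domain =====

-- B replaces A's sieve (two O(n) counter arrays summed at the end) by the identity
-- Σ_{2≤i≤n} ω(i) = Σ_{prime p≤n} n//p, with primality decided by trial division
-- (no arrays at all); alternative decomposition, not claimed faster.

-- ===== PORT A =====
-- Python's mutable lists are ported as Arrays (O(1) in-place update).  Every index used
-- below is provably nonnegative and in range, so `setIfInBounds`/`getD` at `j.toNat` is
-- exact for Python's `xs[j] = v` / `xs[j]` here (hand-ported: no IndexError is reachable).
def pvASet {α : Type} (a : Array α) (j : Int) (v : α) : Array α := a.setIfInBounds j.toNat v
def pvAGet {α : Type} (a : Array α) (j : Int) (d : α) : α := a[j.toNat]?.getD d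

-- inner loop body: is_prime[j] = 0; prime_factors[j] += 1
def pvSieveMark (st : Array Int × Array Int) (j : Int) : Array Int × Array Int :=
  (pvASet st.1 j 0, pvASet st.2 j (pvAGet st.2 j 0 + 1))

-- outer loop body: if is_prime[i] == 1: for j in range(i, n+1, i): …
def pvSieveStep (n : Int) (st : Array Int × Array Int) (i : Int) : Array Int × Array Int :=
  if pvAGet st.1 i 0 = 1 then
    (PySem.List.pyRange i (n + 1) i).foldl pvSieveMark st
  else st

def antichain_sum (n : Int) : Int :=
  ((PySem.List.pyRange 2 (n + 1) 1).foldl (pvSieveStep n)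
    (Array.replicate (n + 1).toNat 1, Array.replicate (n + 1).toNat 0)).2.toList.sum

-- ===== PORT B =====
-- is_prime_td's while loop: d runs over odd values while d*d <= p; p % d == 0 returns False
def pvTDOdd (p : Int) (d : Int) : Bool :=
  if _h : d * d ≤ p then
    if PySem.Int.mod p d = 0 then false
    else pvTDOdd p (d + 2)
  else true
termination_by (p + 1 - d).toNat
decreasing_by
  have hd : d ≤ p := by nlinarith [sq_nonneg (d - 1), sq_nonneg d]
  omega

-- is_prime_td: if p % 2 == 0: return p == 2; then the odd loop from d = 3
def pvIsPrimeTD (p : Int) : Bool :=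
  if PySem.Int.mod p 2 = 0 then p == 2 else pvTDOdd p 3

def antichain_sum_alt (n : Int) : Int :=
  (PySem.List.pyRange 2 (n + 1) 1).foldl
    (fun total p => if pvIsPrimeTD p then total + PySem.Int.floordiv n p else total) 0

-- ===== PRECONDITION & SPEC =====
def Spec_antichain_sum (n : Int) (out : Int) : Prop := out = antichain_sum_alt n
instance (n : Int) (out : Int) : Decidable (Spec_antichain_sum n out) := by unfold Spec_antichain_sum; infer_instance

-- ===== CLAIM (what is proved, stated in full; the proofs are below) =====
def Claim_equal_antichain_sum : Prop := ∀ (n : Int), Dom_antichain_sum n → Spec_antichain_sum n (antichain_sum n)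

-- ===== LEMMAS AND PROOFS =====

-- t (an index, 0 ≤ t ≤ n) has been struck by the sieve after the outer loop has run for i < K
def pvMarked (K : Int) (t : Nat) : Prop :=
  1 ≤ t ∧ ∃ p : Int, 2 ≤ p ∧ p < K ∧ Nat.Prime p.toNat ∧ p ∣ (t : Int)

-- the "price per prime" summand of the closed form
def pvTerm (n i : Int) : Int := if Nat.Prime i.toNat then PySem.Int.floordiv n i else 0

-- proof-side List models of A's loop bodies (related to the Array port below)
def pvLMark (st : List Int × List Int) (j : Int) : List Int × List Int :=
  (PySem.List.pySetD st.1 j 0, PySem.List.pySetD st.2 j (PySem.List.pyGetD st.2 j 0 + 1))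

def pvLStep (n : Int) (st : List Int × List Int) (i : Int) : List Int × List Int :=
  if PySem.List.pyGetD st.1 i 0 = 1 then
    (PySem.List.pyRange i (n + 1) i).foldl pvLMark st
  else st

lemma getD_set {α : Type} (xs : List α) (u : Nat) (v d : α) (t : Nat) (hu : u < xs.length) :
    (xs.set u v).getD t d = if t = u then v else xs.getD t d := by
  simp only [List.getD_eq_getElem?_getD, List.getElem?_set]
  by_cases h : u = t
  · subst h; simp [hu]
  · rw [if_neg h, if_neg (fun hc => h hc.symm)]

lemma sum_set_add_one (xs : List Int) (t : Nat) (ht : t < xs.length) :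
    (xs.set t (xs.getD t 0 + 1)).sum = xs.sum + 1 := by
  induction xs generalizing t with
  | nil => simp at ht
  | cons x xs ih =>
    cases t with
    | zero => simp [List.getD]; ring
    | succ t =>
      have ht' : t < xs.length := by simpa using ht
      simp only [List.set, List.getD_cons_succ, List.sum_cons, ih t ht']
      ring

lemma mark_fst_length (l : List Int) (st : List Int × List Int) :
    (l.foldl pvLMark st).1.length = st.1.length := by
  induction l generalizing st with
  | nil => rfl
  | cons j l ih => simp [List.foldl_cons, ih, pvLMark, PySem.List.length_pySetD]

lemma mark_snd_length (l : List Int) (st : List Int × List Int) :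
    (l.foldl pvLMark st).2.length = st.2.length := by
  induction l generalizing st with
  | nil => rfl
  | cons j l ih => simp [List.foldl_cons, ih, pvLMark, PySem.List.length_pySetD]

lemma mark_fst_getD (l : List Int) (st : List Int × List Int)
    (hl : ∀ j ∈ l, 0 ≤ j ∧ j.toNat < st.1.length) (t : Nat) :
    (l.foldl pvLMark st).1.getD t 0 =
      if ∃ j ∈ l, j.toNat = t then 0 else st.1.getD t 0 := by
  induction l generalizing st with
  | nil => simp
  | cons j l ih =>
    obtain ⟨hj0, hjlt⟩ := hl j (List.mem_cons_self ..)
    have hlen1 : (pvLMark st j).1.length = st.1.length := by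
      simp [pvLMark, PySem.List.length_pySetD]
    rw [List.foldl_cons, ih (pvLMark st j)
      (fun x hx => by rw [hlen1]; exact hl x (List.mem_cons_of_mem _ hx))]
    have hfst : (pvLMark st j).1.getD t 0 =
        if t = j.toNat then 0 else st.1.getD t 0 := by
      simp only [pvLMark, PySem.List.pySetD_of_nonneg _ _ hj0]
      exact getD_set st.1 j.toNat 0 0 t hjlt
    by_cases h1 : ∃ x ∈ l, x.toNat = t
    · rw [if_pos h1, if_pos ⟨h1.choose, List.mem_cons_of_mem _ h1.choose_spec.1, h1.choose_spec.2⟩]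
    · rw [if_neg h1, hfst]
      by_cases h2 : t = j.toNat
      · rw [if_pos h2, if_pos ⟨j, List.mem_cons_self .., h2.symm⟩]
      · rw [if_neg h2, if_neg ?_]
        rintro ⟨x, hx, hxt⟩
        rcases List.mem_cons.mp hx with rfl | hx'
        · exact h2 hxt.symm
        · exact h1 ⟨x, hx', hxt⟩

lemma mark_snd_sum (l : List Int) (st : List Int × List Int)
    (hl : ∀ j ∈ l, 0 ≤ j ∧ j.toNat < st.2.length) :
    (l.foldl pvLMark st).2.sum = st.2.sum + l.length := by
  induction l generalizing st with
  | nil => simp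
  | cons j l ih =>
    obtain ⟨hj0, hjlt⟩ := hl j (List.mem_cons_self ..)
    have hlen2 : (pvLMark st j).2.length = st.2.length := by
      simp [pvLMark, PySem.List.length_pySetD]
    rw [List.foldl_cons, ih (pvLMark st j)
      (fun x hx => by rw [hlen2]; exact hl x (List.mem_cons_of_mem _ hx))]
    have hget : PySem.List.pyGetD st.2 j 0 = st.2.getD j.toNat 0 := by
      rw [PySem.List.pyGetD_eq_getElem st.2 0 hj0 (by omega : j < (st.2.length : Int))]
      exact (List.getD_eq_getElem st.2 0 hjlt).symm
    have hsnd : (pvLMark st j).2.sum = st.2.sum + 1 := by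
      simp only [pvLMark, PySem.List.pySetD_of_nonneg _ _ hj0, hget]
      exact sum_set_add_one st.2 j.toNat hjlt
    rw [hsnd]
    simp only [List.length_cons]
    push_cast
    ring

lemma inner_mem (n i j : Int) (hi : 2 ≤ i) :
    j ∈ PySem.List.pyRange i (n + 1) i ↔ i ≤ j ∧ j ≤ n ∧ i ∣ j := by
  rw [PySem.List.mem_pyRange_iff_of_pos (by omega)]
  constructor
  · rintro ⟨h1, h2, h3⟩
    refine ⟨h1, by omega, ?_⟩
    have := dvd_add h3 (dvd_refl i)
    simpa using this
  · rintro ⟨h1, h2, h3⟩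
    exact ⟨h1, by omega, dvd_sub h3 (dvd_refl i)⟩

lemma inner_length (n i : Int) (hi : 2 ≤ i) (hin : i ≤ n) :
    ((PySem.List.pyRange i (n + 1) i).length : Int) = PySem.Int.floordiv n i := by
  rw [PySem.List.pyRange_of_pos _ _ (by omega : (0:Int) < i)]
  rw [if_pos (by omega : i < n + 1)]
  rw [List.length_map, List.length_range]
  rw [PySem.Int.floordiv_eq_ediv_of_pos (by omega : (0:Int) < i)]
  have h1 : n + 1 - i + i - 1 = n := by ring
  rw [h1]
  exact Int.toNat_of_nonneg (Int.ediv_nonneg (by omega) (by omega))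

lemma marked_self_iff (K : Int) (hK : 2 ≤ K) : pvMarked K K.toNat ↔ ¬ Nat.Prime K.toNat := by
  have hKc : (K.toNat : Int) = K := Int.toNat_of_nonneg (by omega)
  constructor
  · rintro ⟨-, p, hp2, hpK, hpP, hpd⟩ hP
    have hpc : (p.toNat : Int) = p := Int.toNat_of_nonneg (by omega)
    have hdvd : p.toNat ∣ K.toNat := by
      have : (p.toNat : Int) ∣ (K.toNat : Int) := by rw [hpc, hKc]; rw [hKc] at hpd; exact hpd
      exact_mod_cast this
    rcases hP.eq_one_or_self_of_dvd p.toNat hdvd with h | h <;> omega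
  · intro h
    refine ⟨by omega, (K.toNat.minFac : Int), ?_, ?_, ?_, ?_⟩
    · exact_mod_cast (Nat.minFac_prime (by omega : K.toNat ≠ 1)).two_le
    · have hle : K.toNat.minFac ≤ K.toNat := Nat.le_of_dvd (by omega) (Nat.minFac_dvd _)
      have hne : K.toNat.minFac ≠ K.toNat := by
        intro hc
        exact h (hc ▸ Nat.minFac_prime (by omega : K.toNat ≠ 1))
      omega
    · simpa using Nat.minFac_prime (by omega : K.toNat ≠ 1)
    · exact_mod_cast Nat.minFac_dvd K.toNat

-- the sieve state after the outer loop has processed i = 2 .. K-1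
def pvSt (n K : Int) : List Int × List Int :=
  (PySem.List.pyRange 2 K 1).foldl (pvLStep n)
    (List.replicate (n + 1).toNat 1, List.replicate (n + 1).toNat 0)

-- the loop invariant of A's outer loop
def pvInv (n K : Int) : Prop :=
  (pvSt n K).1.length = (n + 1).toNat ∧ (pvSt n K).2.length = (n + 1).toNat ∧
  (∀ t : Nat, t < (n + 1).toNat →
    (pvMarked K t → (pvSt n K).1.getD t 0 = 0) ∧
    (¬ pvMarked K t → (pvSt n K).1.getD t 0 = 1)) ∧
  (pvSt n K).2.sum = ((PySem.List.pyRange 2 K 1).map (pvTerm n)).sum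

lemma sieve_inv (n : Int) (hn : 2 ≤ n) :
    ∀ m : Nat, (m : Int) ≤ n - 1 → pvInv n (2 + m) := by
  intro m
  induction m with
  | zero =>
    intro _
    have hnil : PySem.List.pyRange 2 (2 + ((0:Nat):Int)) 1 = [] :=
      PySem.List.pyRange_one_eq_nil (by norm_num)
    unfold pvInv pvSt
    rw [hnil]
    simp only [List.foldl_nil, List.map_nil, List.sum_nil]
    refine ⟨List.length_replicate, List.length_replicate, ?_, by simp [List.sum_replicate]⟩
    intro t ht
    constructor
    · rintro ⟨-, p, hp2, hpK, -, -⟩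
      push_cast at hpK; omega
    · intro _
      simp [List.getD_eq_getElem?_getD, ht]
  | succ m ih =>
    intro hm
    have hmle : (m : Int) ≤ n - 1 := by push_cast at hm ⊢; omega
    obtain ⟨h1, h2, h3, h4⟩ := ih hmle
    have hK2 : (2:Int) ≤ 2 + (m:Int) := by omega
    have hKn : 2 + (m:Int) ≤ n := by push_cast at hm; omega
    have hcast : (2 + ((m+1:Nat):Int)) = (2 + (m:Int)) + 1 := by push_cast; ring
    rw [hcast]
    set K : Int := 2 + (m:Int) with hKdef
    have hKt : K.toNat < (n + 1).toNat := by omega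
    have hstep : PySem.List.pyRange 2 (K + 1) 1 = PySem.List.pyRange 2 K 1 ++ [K] :=
      PySem.List.pyRange_one_succ_right (by omega)
    have hunf : pvSt n (K + 1) = pvLStep n (pvSt n K) K := by
      unfold pvSt; rw [hstep, List.foldl_append]; rfl
    have hcond : PySem.List.pyGetD (pvSt n K).1 K 0 = (pvSt n K).1.getD K.toNat 0 := by
      rw [PySem.List.pyGetD_eq_getElem _ 0 (by omega) (by rw [h1]; omega)]
      exact (List.getD_eq_getElem _ 0 (by omega)).symm
    by_cases hp : Nat.Prime K.toNat
    · -- K is prime: the branch fires and marks all multiples of K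
      have hnm : ¬ pvMarked K K.toNat := fun h => (marked_self_iff K hK2).mp h hp
      have hval : (pvSt n K).1.getD K.toNat 0 = 1 := (h3 K.toNat hKt).2 hnm
      have hfire : pvLStep n (pvSt n K) K =
          (PySem.List.pyRange K (n + 1) K).foldl pvLMark (pvSt n K) := by
        unfold pvLStep; rw [hcond, hval, if_pos rfl]
      have hmem1 : ∀ j ∈ PySem.List.pyRange K (n + 1) K, 0 ≤ j ∧ j.toNat < (pvSt n K).1.length := by
        intro j hj
        obtain ⟨ha, hb, -⟩ := (inner_mem n K j hK2).mp hj
        rw [h1]; omega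
      have hmem2 : ∀ j ∈ PySem.List.pyRange K (n + 1) K, 0 ≤ j ∧ j.toNat < (pvSt n K).2.length := by
        intro j hj
        obtain ⟨ha, hb, -⟩ := (inner_mem n K j hK2).mp hj
        rw [h2]; omega
      unfold pvInv
      rw [hunf, hfire]
      refine ⟨by rw [mark_fst_length, h1], by rw [mark_snd_length, h2], ?_, ?_⟩
      · intro t ht
        have hget := mark_fst_getD (PySem.List.pyRange K (n + 1) K) (pvSt n K) hmem1 t
        constructor
        · rintro ⟨ht1, p, hp2, hpK1, hpp, hpd⟩
          by_cases hex : ∃ j ∈ PySem.List.pyRange K (n + 1) K, j.toNat = t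
          · rw [hget, if_pos hex]
          · rw [hget, if_neg hex]
            rcases (by omega : p < K ∨ p = K) with hlt | rfl
            · exact (h3 t ht).1 ⟨ht1, p, hp2, hlt, hpp, hpd⟩
            · exfalso
              apply hex
              refine ⟨(t : Int), (inner_mem n K _ hK2).mpr ⟨?_, by omega, hpd⟩, by simp⟩
              exact Int.le_of_dvd (by omega) hpd
        · intro hnM
          have hex : ¬ ∃ j ∈ PySem.List.pyRange K (n + 1) K, j.toNat = t := by
            rintro ⟨j, hj, hjt⟩
            obtain ⟨ha, hb, hdvd⟩ := (inner_mem n K j hK2).mp hj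
            have hjt' : (t : Int) = j := by omega
            exact hnM ⟨by omega, K, hK2, by omega, hp, by rw [hjt']; exact hdvd⟩
          rw [hget, if_neg hex]
          exact (h3 t ht).2 (fun ⟨ht1, p, hp2, hpK, hpp, hpd⟩ =>
            hnM ⟨ht1, p, hp2, by omega, hpp, hpd⟩)
      · rw [mark_snd_sum _ _ hmem2, h4, hstep, List.map_append, List.sum_append]
        simp only [List.map_cons, List.map_nil, List.sum_cons, List.sum_nil]
        rw [inner_length n K hK2 hKn, pvTerm, if_pos hp]
        ring
    · -- K is composite: the branch does not fire
      have hmar : pvMarked K K.toNat := (marked_self_iff K hK2).mpr hp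
      have hval : (pvSt n K).1.getD K.toNat 0 = 0 := (h3 K.toNat hKt).1 hmar
      have hskip : pvLStep n (pvSt n K) K = pvSt n K := by
        unfold pvLStep; rw [hcond, hval, if_neg (by decide)]
      have hiff : ∀ t : Nat, pvMarked (K + 1) t ↔ pvMarked K t := by
        intro t
        constructor
        · rintro ⟨ht1, p, hp2, hpK1, hpp, hpd⟩
          rcases (by omega : p < K ∨ p = K) with hlt | rfl
          · exact ⟨ht1, p, hp2, hlt, hpp, hpd⟩
          · exact absurd hpp hp
        · rintro ⟨ht1, p, hp2, hpK, hpp, hpd⟩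
          exact ⟨ht1, p, hp2, by omega, hpp, hpd⟩
      unfold pvInv
      rw [hunf, hskip]
      refine ⟨h1, h2, ?_, ?_⟩
      · intro t ht
        exact ⟨fun hM => (h3 t ht).1 ((hiff t).mp hM),
               fun hnM => (h3 t ht).2 (fun hc => hnM ((hiff t).mpr hc))⟩
      · rw [h4, hstep, List.map_append, List.sum_append]
        simp only [List.map_cons, List.map_nil, List.sum_cons, List.sum_nil]
        rw [pvTerm, if_neg hp]
        ring

-- ===== Array-to-List simulation of A's port =====

lemma pvAGet_eq {α : Type} (a : Array α) (j : Int) (d : α) (hj : 0 ≤ j) :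
    pvAGet a j d = PySem.List.pyGetD a.toList j d := by
  rw [PySem.List.pyGetD_of_nonneg _ _ hj]
  simp [pvAGet, List.getD_eq_getElem?_getD]

lemma pvASet_toList {α : Type} (a : Array α) (j : Int) (v : α) (hj : 0 ≤ j) :
    (pvASet a j v).toList = PySem.List.pySetD a.toList j v := by
  rw [PySem.List.pySetD_of_nonneg _ _ hj]
  simp [pvASet, Array.toList_setIfInBounds]

lemma mark_sim : ∀ (l : List Int), (∀ j ∈ l, 0 ≤ j) → ∀ st : Array Int × Array Int,
    ((l.foldl pvSieveMark st).1.toList, (l.foldl pvSieveMark st).2.toList)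
      = l.foldl pvLMark (st.1.toList, st.2.toList) := by
  intro l
  induction l with
  | nil => intro _ st; rfl
  | cons j l ih =>
    intro hl st
    have hj := (hl j (List.mem_cons_self ..))
    have hstep : ((pvSieveMark st j).1.toList, (pvSieveMark st j).2.toList)
        = pvLMark (st.1.toList, st.2.toList) j := by
      simp [pvSieveMark, pvLMark, pvASet_toList _ _ _ hj, pvAGet_eq _ _ _ hj]
    rw [List.foldl_cons, List.foldl_cons,
        ih (fun x hx => hl x (List.mem_cons_of_mem _ hx)) (pvSieveMark st j), hstep]

lemma step_sim (n i : Int) (hi : 2 ≤ i) (st : Array Int × Array Int) :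
    ((pvSieveStep n st i).1.toList, (pvSieveStep n st i).2.toList)
      = pvLStep n (st.1.toList, st.2.toList) i := by
  unfold pvSieveStep pvLStep
  rw [pvAGet_eq _ _ _ (by omega)]
  by_cases h : PySem.List.pyGetD st.1.toList i 0 = 1
  · rw [if_pos h, if_pos h]
    exact mark_sim _ (fun j hj => by have := ((inner_mem n i j hi).mp hj).1; omega) st
  · rw [if_neg h, if_neg h]

lemma outer_sim (n : Int) : ∀ (l : List Int), (∀ x ∈ l, 2 ≤ x) →
    ∀ st : Array Int × Array Int,
    ((l.foldl (pvSieveStep n) st).1.toList, (l.foldl (pvSieveStep n) st).2.toList)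
      = l.foldl (pvLStep n) (st.1.toList, st.2.toList) := by
  intro l
  induction l with
  | nil => intro _ st; rfl
  | cons i l ih =>
    intro hl st
    rw [List.foldl_cons, List.foldl_cons,
        ih (fun x hx => hl x (List.mem_cons_of_mem _ hx)) (pvSieveStep n st i),
        step_sim n i (hl i (List.mem_cons_self ..)) st]

-- ===== B-side lemmas: the trial-division test decides primality =====

-- primality of p ≥ 2 via absence of a small divisor
lemma prime_iff_no_small_divisor (p : Int) (hp : 2 ≤ p) :
    Nat.Prime p.toNat ↔ ∀ e : Int, 2 ≤ e → e * e ≤ p → ¬ e ∣ p := by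
  have hpc : (p.toNat : Int) = p := Int.toNat_of_nonneg (by omega)
  constructor
  · intro hP e he hee hdvd
    have hec : (e.toNat : Int) = e := Int.toNat_of_nonneg (by omega)
    have hdvd' : e.toNat ∣ p.toNat := by
      have : (e.toNat : Int) ∣ (p.toNat : Int) := by rw [hec, hpc]; exact hdvd
      exact_mod_cast this
    rcases hP.eq_one_or_self_of_dvd e.toNat hdvd' with h | h
    · omega
    · have : e = p := by omega
      nlinarith [this]
  · intro h
    by_contra hnp
    have hsq : p.toNat.minFac ^ 2 ≤ p.toNat := Nat.minFac_sq_le_self (by omega) hnp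
    have hq := Nat.minFac_prime (by omega : p.toNat ≠ 1)
    refine h (p.toNat.minFac : Int) (by exact_mod_cast hq.two_le) ?_ ?_
    · have : ((p.toNat.minFac ^ 2 : Nat) : Int) ≤ (p.toNat : Int) := by exact_mod_cast hsq
      push_cast at this
      nlinarith [this]
    · rw [← hpc]; exact_mod_cast Nat.minFac_dvd p.toNat

-- for odd p, the odd-step loop from odd d returns true iff no e ≥ d with e*e ≤ p divides p
lemma tdodd_iff (p : Int) (hodd : ¬ (2:Int) ∣ p) : ∀ m : Nat, ∀ d : Int, 3 ≤ d → ¬ (2:Int) ∣ d →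
    (p + 1 - d).toNat ≤ m →
    (pvTDOdd p d = true ↔ ∀ e : Int, d ≤ e → e * e ≤ p → ¬ e ∣ p) := by
  intro m
  induction m with
  | zero =>
    intro d hd hd2 hm
    have hpd : p < d := by omega
    rw [pvTDOdd]
    rw [dif_neg (by nlinarith : ¬ d * d ≤ p)]
    simp only [true_iff]
    intro e he hee
    exfalso; nlinarith
  | succ m ih =>
    intro d hd hd2 hm
    rw [pvTDOdd]
    by_cases hg : d * d ≤ p
    · rw [dif_pos hg]
      by_cases hm0 : PySem.Int.mod p d = 0
      · rw [if_pos hm0]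
        simp only [Bool.false_eq_true, false_iff]
        intro h
        exact h d le_rfl hg ((PySem.Int.mod_eq_zero_iff_dvd p d).mp hm0)
      · rw [if_neg hm0]
        rw [ih (d + 2) (by omega) (by omega) (by omega)]
        constructor
        · intro h e he hee hdvd
          rcases (by omega : e = d ∨ e = d + 1 ∨ d + 2 ≤ e) with rfl | rfl | he'
          · exact hm0 ((PySem.Int.mod_eq_zero_iff_dvd p e).mpr hdvd)
          · -- e = d + 1 is even; an even divisor of the odd p is impossible
            exact hodd (dvd_trans ⟨(d + 1) / 2, by omega⟩ hdvd)
          · exact h e he' hee hdvd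
        · intro h e he hee
          exact h e (by omega) hee
    · rw [dif_neg hg]
      simp only [true_iff]
      intro e he hee
      exfalso; nlinarith

lemma prime_iff_td (p : Int) (hp : 2 ≤ p) : pvIsPrimeTD p = true ↔ Nat.Prime p.toNat := by
  unfold pvIsPrimeTD
  by_cases h2 : PySem.Int.mod p 2 = 0
  · -- p even: prime iff p = 2
    have hdvd : (2:Int) ∣ p := (PySem.Int.mod_eq_zero_iff_dvd p 2).mp h2
    rw [if_pos h2]
    constructor
    · intro h
      have : p = 2 := by simpa using h
      rw [this]; decide
    · intro hP
      have hdvd' : 2 ∣ p.toNat := by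
        have : ((2:Nat) : Int) ∣ (p.toNat : Int) := by
          rw [Int.toNat_of_nonneg (by omega : (0:Int) ≤ p)]; exact_mod_cast hdvd
        exact_mod_cast this
      rcases hP.eq_one_or_self_of_dvd 2 hdvd' with h | h
      · omega
      · simp; omega
  · -- p odd: the odd-step loop from 3 decides it
    have hnodd : ¬ (2:Int) ∣ p := fun h => h2 ((PySem.Int.mod_eq_zero_iff_dvd p 2).mpr h)
    have hp3 : 3 ≤ p := by
      rcases (by omega : p = 2 ∨ 3 ≤ p) with rfl | h
      · exact absurd ⟨1, by ring⟩ hnodd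
      · exact h
    rw [if_neg h2, tdodd_iff p hnodd (p + 1 - 3).toNat 3 (by omega) (by decide) le_rfl,
        prime_iff_no_small_divisor p hp]
    constructor
    · intro h e he hee hdvd
      rcases (by omega : e = 2 ∨ 3 ≤ e) with rfl | he'
      · exact hnodd hdvd
      · exact h e he' hee hdvd
    · intro h e he hee
      exact h e (by omega) hee

-- B's fold accumulates exactly the closed-form sum
lemma foldl_td (n : Int) : ∀ (l : List Int), (∀ p ∈ l, 2 ≤ p) → ∀ a : Int,
    l.foldl (fun total p => if pvIsPrimeTD p then total + PySem.Int.floordiv n p else total) a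
      = a + (l.map (pvTerm n)).sum := by
  intro l
  induction l with
  | nil => intro _ a; simp
  | cons p l ih =>
    intro hl a
    have hp := hl p (List.mem_cons_self ..)
    rw [List.foldl_cons, ih (fun x hx => hl x (List.mem_cons_of_mem _ hx))]
    simp only [List.map_cons, List.sum_cons]
    by_cases hP : Nat.Prime p.toNat
    · rw [if_pos ((prime_iff_td p hp).mpr hP), pvTerm, if_pos hP]; ring
    · rw [if_neg (by simp [(prime_iff_td p hp), hP]), pvTerm, if_neg hP]; ring

-- ===== VERDICT (by name: the statement is the Claim_ definition above) =====
theorem antichain_sum_spec : Claim_equal_antichain_sum := by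
  intro n _
  unfold Spec_antichain_sum
  have hmem : ∀ x ∈ PySem.List.pyRange 2 (n + 1) 1, (2:Int) ≤ x :=
    fun x hx => ((PySem.List.mem_pyRange_one).mp hx).1
  have hA := outer_sim n (PySem.List.pyRange 2 (n + 1) 1) hmem
    (Array.replicate (n + 1).toNat 1, Array.replicate (n + 1).toNat 0)
  simp only [Array.toList_replicate] at hA
  have hA2 := congrArg Prod.snd hA
  simp only at hA2
  unfold antichain_sum antichain_sum_alt
  rw [hA2, foldl_td n _ hmem 0]
  by_cases hn : 2 ≤ n
  · have hAi := sieve_inv n hn (n - 1).toNat (by omega)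
    rw [show (2 + (((n - 1).toNat : Nat) : Int)) = n + 1 by omega] at hAi
    obtain ⟨-, -, -, h4⟩ := hAi
    unfold pvSt at h4
    rw [h4]
    ring
  · have hnil : PySem.List.pyRange 2 (n + 1) 1 = [] :=
      PySem.List.pyRange_one_eq_nil (by omega)
    rw [hnil]
    simp [List.sum_replicate]
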